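-- pv_equiv track=rewrite | github.com/jbpayton/promethia | FunctionParser.py | generate_token_signature_tuples
-- ===== SOURCE A (Python) =====
-- from itertools import product
--
-- def generate_token_signature_tuples(token_ids, optional_map):
--     assert len(token_ids) == len(optional_map), "token_ids and optional_map must be of the same length."
--
--     optional_elements = [(i, t) for i, (t, is_optional) in enumerate(zip(token_ids, optional_map)) if is_optional]
--     combinations = list(product([True, False], repeat=len(optional_elements)))
--
--     token_signature_tuples = []
--     for combination in combinations:
--         current_signature = token_ids[:]
--         for include, (index, _) in zip(combination, optional_elements):
--             if not include:
--                 current_signature[index] = None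
--         token_signature_tuples.append(tuple(filter(None, current_signature)))
--
--     return token_signature_tuples
-- ===== SOURCE B (Python) =====
-- def generate_token_signature_tuples(token_ids, optional_map):
--     assert len(token_ids) == len(optional_map), "token_ids and optional_map must be of the same length."
--
--     results = []
--
--     def walk(i, acc):
--         if i == len(token_ids):
--             results.append(tuple(acc))
--             return
--         token = token_ids[i]
--         included = acc + [token] if token else acc
--         if optional_map[i]:
--             walk(i + 1, included)   # include branch first, matching product's order
--             walk(i + 1, acc)        # exclude branch
--         else:
--             walk(i + 1, included)
--
--     walk(0, [])
--     return results
-- ===== Notes on version B (the rewrite author's own statement) =====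
-- stated objective: alternative
-- what changed: Replaced the itertools.product mask enumeration plus per-mask copy/overwrite/filter passes with a direct recursive subset walk over the positions that branches include-before-exclude at each optional token and appends truthy tokens as it goes.
-- outside the precondition, e.g. on generate_token_signature_tuples([1], []): A raises AssertionError, B raises AssertionError
import Mathlib
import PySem

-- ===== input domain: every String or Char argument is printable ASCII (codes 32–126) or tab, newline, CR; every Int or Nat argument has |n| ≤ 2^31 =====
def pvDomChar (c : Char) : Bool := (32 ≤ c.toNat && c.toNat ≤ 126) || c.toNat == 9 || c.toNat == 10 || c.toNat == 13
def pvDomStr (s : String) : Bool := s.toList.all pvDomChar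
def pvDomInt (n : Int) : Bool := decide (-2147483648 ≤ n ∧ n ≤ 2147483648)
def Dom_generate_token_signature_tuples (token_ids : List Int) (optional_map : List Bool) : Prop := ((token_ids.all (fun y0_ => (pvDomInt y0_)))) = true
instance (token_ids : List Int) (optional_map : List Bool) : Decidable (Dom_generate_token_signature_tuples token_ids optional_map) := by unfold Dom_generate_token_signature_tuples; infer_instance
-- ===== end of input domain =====

-- B replaces the product-mask enumeration with a recursive include/exclude subset walk (alternative decomposition, same cost).

-- ===== PORT A =====
-- product([True, False], repeat=n): leftmost component varies slowest, True before False
def pvProdTF : Nat → List (List Bool)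
  | 0 => [[]]
  | n + 1 => (pvProdTF n).map (true :: ·) ++ (pvProdTF n).map (false :: ·)

def generate_token_signature_tuples (token_ids : List Int) (optional_map : List Bool) : List (List Int) :=
  let optional_elements : List (Int × Int) :=
    (PySem.List.enumerate (token_ids.zip optional_map) 0).filterMap
      (fun p => if p.2.2 then some (p.1, p.2.1) else none)
  let combinations := pvProdTF optional_elements.length
  combinations.map (fun comb =>
    let current_signature :=
      (comb.zip optional_elements).foldl
        (fun sig q => if q.1 then sig else PySem.List.pySetD sig q.2.1 none)
        (token_ids.map some)
    -- tuple(filter(None, current_signature)): drops None and falsy 0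
    current_signature.filterMap (fun o => match o with
      | some t => if t = 0 then none else some t
      | none => none))

-- ===== PORT B =====
def pvWalk : List (Int × Bool) → List Int → List (List Int)
  | [], acc => [acc]
  | (t, o) :: rest, acc =>
    let included := if t ≠ 0 then acc ++ [t] else acc
    let out := pvWalk rest included
    if o then out ++ pvWalk rest acc else out

def generate_token_signature_tuples_alt (token_ids : List Int) (optional_map : List Bool) : List (List Int) :=
  pvWalk (token_ids.zip optional_map) []

-- ===== PRECONDITION & SPEC =====
-- Python A (and B) assert len(token_ids) == len(optional_map) and raise AssertionError otherwise.
def Pre_generate_token_signature_tuples (token_ids : List Int) (optional_map : List Bool) : Prop :=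
  token_ids.length = optional_map.length
instance (token_ids : List Int) (optional_map : List Bool) : Decidable (Pre_generate_token_signature_tuples token_ids optional_map) := by unfold Pre_generate_token_signature_tuples; infer_instance
def pvWitness_generate_token_signature_tuples : List Int × List Bool := ([3, 0, 7], [false, true, true])

def Spec_generate_token_signature_tuples (token_ids : List Int) (optional_map : List Bool) (out : List (List Int)) : Prop := out = generate_token_signature_tuples_alt token_ids optional_map
instance (token_ids : List Int) (optional_map : List Bool) (out : List (List Int)) : Decidable (Spec_generate_token_signature_tuples token_ids optional_map out) := by unfold Spec_generate_token_signature_tuples; infer_instance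

-- ===== CLAIM (what is proved, stated in full; the proofs are below) =====
def Claim_equal_generate_token_signature_tuples : Prop := ∀ (token_ids : List Int) (optional_map : List Bool), Dom_generate_token_signature_tuples token_ids optional_map → Pre_generate_token_signature_tuples token_ids optional_map → Spec_generate_token_signature_tuples token_ids optional_map (generate_token_signature_tuples token_ids optional_map)

-- ===== LEMMAS AND PROOFS =====

-- the fold step and the filter function of port A, named for the proofs
def pvStep : List (Option Int) → Bool × (Int × Int) → List (Option Int) :=
  fun sig q => if q.1 then sig else PySem.List.pySetD sig q.2.1 none

def pvG : Option Int → Option Int :=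
  fun o => match o with
    | some t => if t = 0 then none else some t
    | none => none

-- the optional-elements comprehension, abstracted over the enumerate start index
def pvOE (l : List (Int × Bool)) (s : Int) : List (Int × Int) :=
  (PySem.List.enumerate l s).filterMap (fun p => if p.2.2 then some (p.1, p.2.1) else none)

-- order-free specification both ports are reduced to
def pvSpecF : List (Int × Bool) → List (List Int)
  | [] => [[]]
  | (t, o) :: rest =>
    let m := (pvSpecF rest).map ((if t ≠ 0 then [t] else []) ++ ·)
    if o then m ++ pvSpecF rest else m

lemma pvA_unfold (ts : List Int) (os : List Bool) :
    generate_token_signature_tuples ts os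
      = (pvProdTF (pvOE (ts.zip os) 0).length).map
          (fun comb => ((comb.zip (pvOE (ts.zip os) 0)).foldl pvStep (ts.map some)).filterMap pvG) := rfl

lemma pvOE_cons (t : Int) (o : Bool) (l : List (Int × Bool)) (s : Int) :
    pvOE ((t, o) :: l) s = if o then (s, t) :: pvOE l (s + 1) else pvOE l (s + 1) := by
  simp only [pvOE, PySem.List.enumerate_cons, List.filterMap_cons]
  split_ifs <;> simp_all

lemma pvOE_shift (l : List (Int × Bool)) : ∀ s : Int,
    pvOE l (s + 1) = (pvOE l s).map (fun p => (p.1 + 1, p.2)) := by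
  induction l with
  | nil => intro s; simp [pvOE]
  | cons hd tl ih =>
    intro s
    obtain ⟨t, o⟩ := hd
    rw [pvOE_cons, pvOE_cons, ih (s + 1)]
    split_ifs <;> simp [ih s]

lemma pvOE_nonneg (l : List (Int × Bool)) : ∀ s : Int, ∀ p ∈ pvOE l s, s ≤ p.1 := by
  induction l with
  | nil => intro s p hp; simp [pvOE] at hp
  | cons hd tl ih =>
    intro s p hp
    obtain ⟨t, o⟩ := hd
    rw [pvOE_cons] at hp
    split_ifs at hp with h
    · rcases List.mem_cons.mp hp with hp | hp
      · simp [hp]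
      · have := ih (s + 1) p hp; omega
    · have := ih (s + 1) p hp; omega

lemma pvSetD_cons (x : Option Int) (s : List (Option Int)) (i : Int) (v : Option Int) (h : 0 ≤ i) :
    PySem.List.pySetD (x :: s) (i + 1) v = x :: PySem.List.pySetD s i v := by
  rw [PySem.List.pySetD_of_nonneg _ _ (by omega : (0:Int) ≤ i + 1),
      PySem.List.pySetD_of_nonneg _ _ h]
  have hnat : (i + 1).toNat = i.toNat + 1 := by omega
  rw [hnat]
  rfl

lemma pvFold_shift (comb : List Bool) : ∀ (oe : List (Int × Int)) (x : Option Int) (s : List (Option Int)),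
    (∀ p ∈ oe, 0 ≤ p.1) →
    (comb.zip (oe.map (fun p => (p.1 + 1, p.2)))).foldl pvStep (x :: s)
      = x :: (comb.zip oe).foldl pvStep s := by
  induction comb with
  | nil => intro oe x s _; simp
  | cons inc comb ih =>
    intro oe x s hnn
    cases oe with
    | nil => simp
    | cons q oe =>
      obtain ⟨i, t⟩ := q
      have hi : 0 ≤ i := hnn (i, t) (by simp)
      simp only [List.map_cons, List.zip_cons_cons, List.foldl_cons]
      have hrest : ∀ p ∈ oe, 0 ≤ p.1 := fun p hp => hnn p (by simp [hp])
      cases inc with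
      | false =>
        simp only [pvStep, Bool.false_eq_true, if_false]
        rw [pvSetD_cons x s i none hi]
        exact ih oe _ _ hrest
      | true =>
        simp only [pvStep, ite_true]
        exact ih oe x s hrest

lemma pvFilter_some (t : Int) (rest : List (Option Int)) :
    (some t :: rest).filterMap pvG
      = (if t ≠ 0 then [t] else []) ++ rest.filterMap pvG := by
  by_cases h : t = 0 <;> simp [pvG, h]

lemma pvA_eq_spec : ∀ (ts : List Int) (os : List Bool), ts.length = os.length →
    generate_token_signature_tuples ts os = pvSpecF (ts.zip os) := by
  intro ts
  induction ts with
  | nil =>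
    intro os h
    have : os = [] := List.eq_nil_of_length_eq_zero h.symm
    subst this
    rw [pvA_unfold]
    simp [pvOE, pvProdTF, pvSpecF]
  | cons t ts ih =>
    intro os h
    cases os with
    | nil => simp at h
    | cons o os =>
      have hlen : ts.length = os.length := by simpa using h
      have ihs := ih os hlen
      rw [pvA_unfold] at ihs ⊢
      have hnn : ∀ p ∈ pvOE (ts.zip os) 0, 0 ≤ p.1 := pvOE_nonneg (ts.zip os) 0
      have hshift : pvOE (ts.zip os) 1 = (pvOE (ts.zip os) 0).map (fun p => (p.1 + 1, p.2)) := by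
        have := pvOE_shift (ts.zip os) 0
        norm_num at this
        exact this
      rw [List.zip_cons_cons, pvOE_cons]
      norm_num only
      rw [hshift]
      cases o with
      | false =>
        simp only [Bool.false_eq_true, if_false, List.length_map]
        have hpt : ∀ comb : List Bool,
            ((comb.zip ((pvOE (ts.zip os) 0).map (fun p => (p.1 + 1, p.2)))).foldl pvStep
              ((t :: ts).map some)).filterMap pvG
            = (if t ≠ 0 then [t] else []) ++
              ((comb.zip (pvOE (ts.zip os) 0)).foldl pvStep (ts.map some)).filterMap pvG := by
          intro comb
          rw [List.map_cons, pvFold_shift comb _ _ _ hnn, pvFilter_some]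
        rw [List.map_congr_left (fun comb _ => hpt comb)]
        rw [show (fun comb : List Bool => (if t ≠ 0 then [t] else []) ++
              ((comb.zip (pvOE (ts.zip os) 0)).foldl pvStep (ts.map some)).filterMap pvG)
            = (fun r => (if t ≠ 0 then [t] else []) ++ r) ∘
              (fun comb : List Bool => ((comb.zip (pvOE (ts.zip os) 0)).foldl pvStep (ts.map some)).filterMap pvG)
            from rfl]
        rw [← List.map_map, ihs]
        simp [pvSpecF]
      | true =>
        simp only [ite_true, List.length_cons, List.length_map]
        rw [show pvProdTF ((pvOE (ts.zip os) 0).length + 1)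
              = (pvProdTF (pvOE (ts.zip os) 0).length).map (true :: ·) ++
                (pvProdTF (pvOE (ts.zip os) 0).length).map (false :: ·) from rfl]
        rw [List.map_append]
        have htrue : ∀ comb : List Bool,
            (((true :: comb).zip ((0, t) :: (pvOE (ts.zip os) 0).map (fun p => (p.1 + 1, p.2)))).foldl
              pvStep ((t :: ts).map some)).filterMap pvG
            = (if t ≠ 0 then [t] else []) ++
              ((comb.zip (pvOE (ts.zip os) 0)).foldl pvStep (ts.map some)).filterMap pvG := by
          intro comb
          simp only [List.zip_cons_cons, List.foldl_cons, pvStep, ite_true, List.map_cons]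
          rw [pvFold_shift comb _ _ _ hnn, pvFilter_some]
        have hfalse : ∀ comb : List Bool,
            (((false :: comb).zip ((0, t) :: (pvOE (ts.zip os) 0).map (fun p => (p.1 + 1, p.2)))).foldl
              pvStep ((t :: ts).map some)).filterMap pvG
            = ((comb.zip (pvOE (ts.zip os) 0)).foldl pvStep (ts.map some)).filterMap pvG := by
          intro comb
          simp only [List.zip_cons_cons, List.foldl_cons, pvStep, Bool.false_eq_true, if_false, List.map_cons]
          rw [show PySem.List.pySetD (some t :: ts.map some) (0 : Int) none
                = none :: ts.map some by
              rw [PySem.List.pySetD_of_nonneg _ _ (le_refl (0:Int))]; rfl]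
          rw [pvFold_shift comb _ _ _ hnn]
          simp [pvG]
        have e1 : ((pvProdTF (pvOE (ts.zip os) 0).length).map (true :: ·)).map
              (fun comb => ((comb.zip ((0, t) :: (pvOE (ts.zip os) 0).map (fun p => (p.1 + 1, p.2)))).foldl
                pvStep ((t :: ts).map some)).filterMap pvG)
            = ((pvProdTF (pvOE (ts.zip os) 0).length).map
                (fun comb => ((comb.zip (pvOE (ts.zip os) 0)).foldl pvStep (ts.map some)).filterMap pvG)).map
                ((if t ≠ 0 then [t] else []) ++ ·) := by
          rw [List.map_map, List.map_map]
          exact List.map_congr_left (fun comb _ => htrue comb)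
        have e2 : ((pvProdTF (pvOE (ts.zip os) 0).length).map (false :: ·)).map
              (fun comb => ((comb.zip ((0, t) :: (pvOE (ts.zip os) 0).map (fun p => (p.1 + 1, p.2)))).foldl
                pvStep ((t :: ts).map some)).filterMap pvG)
            = (pvProdTF (pvOE (ts.zip os) 0).length).map
                (fun comb => ((comb.zip (pvOE (ts.zip os) 0)).foldl pvStep (ts.map some)).filterMap pvG) := by
          rw [List.map_map]
          exact List.map_congr_left (fun comb _ => hfalse comb)
        rw [e1, e2, ihs]
        simp [pvSpecF]

lemma pvWalk_acc (l : List (Int × Bool)) : ∀ acc, pvWalk l acc = (pvSpecF l).map (acc ++ ·) := by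
  induction l with
  | nil => intro acc; simp [pvWalk, pvSpecF]
  | cons hd tl ih =>
    intro acc
    obtain ⟨t, o⟩ := hd
    simp only [pvWalk, pvSpecF, ih]
    cases o <;> by_cases h : t = 0 <;>
      simp [h, List.map_map, Function.comp_def, List.append_assoc]

lemma pvB_eq_spec (ts : List Int) (os : List Bool) :
    generate_token_signature_tuples_alt ts os = pvSpecF (ts.zip os) := by
  rw [generate_token_signature_tuples_alt, pvWalk_acc]
  simp

-- ===== VERDICT (by name: the statement is the Claim_ definition above) =====
theorem generate_token_signature_tuples_spec : Claim_equal_generate_token_signature_tuples := by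
  intro ts os _ hpre
  unfold Spec_generate_token_signature_tuples
  rw [pvA_eq_spec ts os hpre, pvB_eq_spec]
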